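-- pv_equiv track=rewrite | github.com/AakanshaMittal/CsvCompare | excelCompare.py | build_composite_headers
-- ===== SOURCE A (Python) =====
-- from typing import List, Dict, Tuple
--
-- def forward_fill(values: List[str]) -> List[str]:
--     current = ""
--     ff: List[str] = []
--     for v in values:
--         v = (v or "").strip()
--         if v:
--             current = v
--         ff.append(current)
--     return ff
--
-- def build_composite_headers(
--     rows: List[List[str]],
--     group_row_1based: int,
--     detail_row_1based: int,
--     joiner: str = "_",
-- ) -> List[str]:
--     gi = group_row_1based - 1
--     di = detail_row_1based - 1
--     if gi < 0 or di < 0: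
--         raise ValueError("Header group/detail row indices must be >= 1.")
--     if len(rows) <= gi or len(rows) <= di:
--         raise IndexError(
--             f"Header rows out of range. File has {len(rows)} rows but group row={group_row_1based}, detail row={detail_row_1based}."
--         )
--
--     header_group = rows[gi] if len(rows) > gi else []
--     header_detail = rows[di] if len(rows) > di else []
--
--     max_cols = max(len(header_group), len(header_detail), max((len(r) for r in rows), default=0))
--     header_group = header_group + [""] * (max_cols - len(header_group))
--     header_detail = header_detail + [""] * (max_cols - len(header_detail))
--
--     ff_group = forward_fill(header_group)
--
--     combined: List[str] = []
--     for c in range(max_cols):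
--         g = ff_group[c].strip()
--         d = header_detail[c].strip()
--         if g and d:
--             combined.append(f"{g}{joiner}{d}")
--         elif d:
--             combined.append(d)
--         elif g:
--             combined.append(g)
--         else:
--             combined.append("")
--     return combined
-- ===== SOURCE B (Python) =====
-- def build_composite_headers(rows, group_row_1based, detail_row_1based, joiner="_"):
--     gi = group_row_1based - 1
--     di = detail_row_1based - 1
--     if gi < 0 or di < 0:
--         raise ValueError("Header group/detail row indices must be >= 1.")
--     if len(rows) <= gi or len(rows) <= di:
--         raise IndexError(
--             f"Header rows out of range. File has {len(rows)} rows but group row={group_row_1based}, detail row={detail_row_1based}."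
--         )
--     hg = rows[gi]
--     hd = rows[di]
--     max_cols = max(len(hg), len(hd), max((len(r) for r in rows), default=0))
--
--     def group_at(c):
--         # governing group label for column c: nearest non-empty group cell at or left of c
--         for j in range(c, -1, -1):
--             s = (hg[j] if j < len(hg) else "").strip()
--             if s:
--                 return s
--         return ""
--
--     out = []
--     for c in range(max_cols):
--         g = group_at(c)
--         d = (hd[c] if c < len(hd) else "").strip()
--         out.append(f"{g}{joiner}{d}" if g and d else (d or g))
--     return out
-- ===== Notes on version B (the rewrite author's own statement) =====
-- stated objective: alternative
-- what changed: Drops the padded arrays and the streaming forward_fill pass entirely: each column's group label is computed independently by a backward search (group_at) for the nearest non-empty group cell at or left of it, so no fill state or intermediate lists are carried.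
import Mathlib
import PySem

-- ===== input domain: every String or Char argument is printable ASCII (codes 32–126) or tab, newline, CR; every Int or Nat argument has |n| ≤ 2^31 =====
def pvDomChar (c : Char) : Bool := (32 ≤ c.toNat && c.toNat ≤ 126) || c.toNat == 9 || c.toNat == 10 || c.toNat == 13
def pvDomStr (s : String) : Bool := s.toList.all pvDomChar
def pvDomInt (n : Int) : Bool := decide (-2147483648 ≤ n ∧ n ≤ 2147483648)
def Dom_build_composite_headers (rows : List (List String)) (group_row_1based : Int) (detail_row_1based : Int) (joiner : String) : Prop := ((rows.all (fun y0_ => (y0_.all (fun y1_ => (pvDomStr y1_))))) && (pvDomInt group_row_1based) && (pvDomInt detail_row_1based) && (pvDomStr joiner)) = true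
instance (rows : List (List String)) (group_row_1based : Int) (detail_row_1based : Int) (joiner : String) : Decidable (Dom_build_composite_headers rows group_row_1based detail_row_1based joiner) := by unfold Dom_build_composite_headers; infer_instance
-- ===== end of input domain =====

-- B replaces A's pad + forward_fill + combine passes by an independent per-column backward search for the governing group label; alternative algorithm, not claimed faster.


-- ===== PORT A =====
def forward_fill (values : List String) : List String :=
  (values.foldl (fun (st : String × List String) v0 =>
      let v := PySem.Str.strip v0         -- (v or "").strip(): for a string, (v or "") is v itself or ""
      let current := if v ≠ "" then v else st.1
      (current, st.2 ++ [current]))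
    ("", [])).2

def build_composite_headers (rows : List (List String)) (group_row_1based : Int) (detail_row_1based : Int) (joiner : String) : List String :=
  let gi := group_row_1based - 1
  let di := detail_row_1based - 1
  if gi < 0 ∨ di < 0 then []              -- raise ValueError (excluded by Pre_)
  else if (rows.length : Int) ≤ gi ∨ (rows.length : Int) ≤ di then []  -- raise IndexError (excluded by Pre_)
  else
    let header_group := if (rows.length : Int) > gi then (PySem.List.pyGet? rows gi).getD [] else []
    let header_detail := if (rows.length : Int) > di then (PySem.List.pyGet? rows di).getD [] else []
    -- max over Nat lengths: Python's max(a, b, max(gen, default=0)) on numbers is the same value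
    let max_cols : Nat := max header_group.length (max header_detail.length ((rows.map List.length).foldl max 0))
    let header_group := header_group ++ List.replicate (max_cols - header_group.length) ""
    let header_detail := header_detail ++ List.replicate (max_cols - header_detail.length) ""
    let ff_group := forward_fill header_group
    (PySem.List.pyRange 0 (max_cols : Int) 1).foldl (fun combined c =>
        let g := PySem.Str.strip (PySem.List.pyGetD ff_group c "")
        let d := PySem.Str.strip (PySem.List.pyGetD header_detail c "")
        if g ≠ "" ∧ d ≠ "" then combined ++ [g ++ joiner ++ d]
        else if d ≠ "" then combined ++ [d]
        else if g ≠ "" then combined ++ [g]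
        else combined ++ [""]) []

-- ===== PORT B =====
-- group_at: the Python inner loop 'for j in range(c, -1, -1): … return s' / 'return ""',
-- ported as structural recursion on c (checks index c first, then c-1, …, then 0, else "").
def group_at (hg : List String) : Nat → String
  | 0 =>
    let s := PySem.Str.strip (hg.getD 0 "")   -- hg[j] if j < len(hg) else ""
    if s ≠ "" then s else ""
  | c+1 =>
    let s := PySem.Str.strip (hg.getD (c+1) "")
    if s ≠ "" then s else group_at hg c

def build_composite_headers_alt (rows : List (List String)) (group_row_1based : Int) (detail_row_1based : Int) (joiner : String) : List String :=
  let gi := group_row_1based - 1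
  let di := detail_row_1based - 1
  if gi < 0 ∨ di < 0 then []              -- raise ValueError (excluded by Pre_)
  else if (rows.length : Int) ≤ gi ∨ (rows.length : Int) ≤ di then []  -- raise IndexError (excluded by Pre_)
  else
    let hg := (PySem.List.pyGet? rows gi).getD []
    let hd := (PySem.List.pyGet? rows di).getD []
    let max_cols : Nat := max hg.length (max hd.length ((rows.map List.length).foldl max 0))
    (List.range max_cols).foldl (fun out c =>
        let g := group_at hg c
        let d := PySem.Str.strip (hd.getD c "")   -- hd[c] if c < len(hd) else ""
        out ++ [if g ≠ "" ∧ d ≠ "" then g ++ joiner ++ d else if d ≠ "" then d else g]) []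

-- ===== PRECONDITION & SPEC =====
-- Pre_ excludes exactly the inputs on which the Python A raises (ValueError for a row index < 1,
-- IndexError for a row index past the number of rows); B raises identically there.
def Pre_build_composite_headers (rows : List (List String)) (group_row_1based : Int) (detail_row_1based : Int) (joiner : String) : Prop :=
  1 ≤ group_row_1based ∧ 1 ≤ detail_row_1based ∧
  group_row_1based ≤ (rows.length : Int) ∧ detail_row_1based ≤ (rows.length : Int)
instance (rows : List (List String)) (group_row_1based : Int) (detail_row_1based : Int) (joiner : String) : Decidable (Pre_build_composite_headers rows group_row_1based detail_row_1based joiner) := by unfold Pre_build_composite_headers; infer_instance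

def pvWitness_build_composite_headers : List (List String) × Int × Int × String :=
  ([["Group A", "", " "], ["x", "y", "z"]], 1, 2, "_")

def Spec_build_composite_headers (rows : List (List String)) (group_row_1based : Int) (detail_row_1based : Int) (joiner : String) (out : List String) : Prop := out = build_composite_headers_alt rows group_row_1based detail_row_1based joiner
instance (rows : List (List String)) (group_row_1based : Int) (detail_row_1based : Int) (joiner : String) (out : List String) : Decidable (Spec_build_composite_headers rows group_row_1based detail_row_1based joiner out) := by unfold Spec_build_composite_headers; infer_instance

-- ===== CLAIM (what is proved, stated in full; the proofs are below) =====
def Claim_equal_build_composite_headers : Prop := ∀ (rows : List (List String)) (group_row_1based : Int) (detail_row_1based : Int) (joiner : String), Dom_build_composite_headers rows group_row_1based detail_row_1based joiner → Pre_build_composite_headers rows group_row_1based detail_row_1based joiner → Spec_build_composite_headers rows group_row_1based detail_row_1based joiner (build_composite_headers rows group_row_1based detail_row_1based joiner)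

-- ===== LEMMAS AND PROOFS =====

-- strip is idempotent
theorem chars_dropWhile_stable_of_prefix (p : Char → Bool) (u v : List Char)
    (hu : List.dropWhile p u = u) (hp : v <+: u) : List.dropWhile p v = v := by
  cases v with
  | nil => rfl
  | cons a t =>
    obtain ⟨w, hw⟩ := hp
    subst hw
    rw [List.cons_append, List.dropWhile_cons] at hu
    rw [List.dropWhile_cons]
    split at hu
    · exfalso
      have hl := congrArg List.length hu
      have h2 := List.length_dropWhile_le p (t ++ w)
      simp at hl h2
      omega
    · rename_i h
      simp [h]

theorem chars_strip_strip (s : List Char) :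
    PySem.Chars.strip (PySem.Chars.strip s) = PySem.Chars.strip s := by
  unfold PySem.Chars.strip PySem.Chars.rstrip PySem.Chars.lstrip
  set p := PySem.Chars.isspace
  set u := List.dropWhile p s with hu
  have hu2 : List.dropWhile p u = u := List.dropWhile_idempotent p s
  have hpref : (List.dropWhile p u.reverse).reverse <+: u := by
    have h1 : List.dropWhile p u.reverse <:+ u.reverse := List.dropWhile_suffix p
    have h2 : (List.dropWhile p u.reverse).reverse <+: u.reverse.reverse :=
      List.reverse_prefix.mpr (by simpa using h1)
    simpa using h2
  rw [chars_dropWhile_stable_of_prefix p u _ hu2 hpref]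
  simp [List.dropWhile_idempotent]

theorem str_strip_strip (s : String) :
    PySem.Str.strip (PySem.Str.strip s) = PySem.Str.strip s := by
  rw [← String.toList_inj]
  simp [PySem.Str.toList_strip, chars_strip_strip]

-- structural form of forward_fill
def ffAux (cur : String) : List String → List String
  | [] => []
  | v :: vs =>
    let s := PySem.Str.strip v
    let cur' := if s ≠ "" then s else cur
    cur' :: ffAux cur' vs

theorem forward_fill_foldl (xs : List String) (cur : String) (acc : List String) :
    (xs.foldl (fun (st : String × List String) v0 =>
        let v := PySem.Str.strip v0
        let current := if v ≠ "" then v else st.1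
        (current, st.2 ++ [current])) (cur, acc)).2 = acc ++ ffAux cur xs := by
  induction xs generalizing cur acc with
  | nil => simp [ffAux]
  | cons v vs ih =>
    simp only [List.foldl_cons]
    have h := ih (if PySem.Str.strip v ≠ "" then PySem.Str.strip v else cur)
                 (acc ++ [if PySem.Str.strip v ≠ "" then PySem.Str.strip v else cur])
    simp [ffAux] at h ⊢
    rw [h]

theorem forward_fill_eq (xs : List String) : forward_fill xs = ffAux "" xs := by
  unfold forward_fill
  simpa using forward_fill_foldl xs "" []

-- backward search with an explicit fallback (group_at is the cur = "" instance)
def gAtD (xs : List String) (cur : String) : Nat → String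
  | 0 =>
    let s := PySem.Str.strip (xs.getD 0 "")
    if s ≠ "" then s else cur
  | c+1 =>
    let s := PySem.Str.strip (xs.getD (c+1) "")
    if s ≠ "" then s else gAtD xs cur c

theorem group_at_eq_gAtD (hg : List String) (c : Nat) : group_at hg c = gAtD hg "" c := by
  induction c with
  | zero => rfl
  | succ c ih => simp only [group_at, gAtD, ih]

-- peeling the head of the list shifts the search and folds the head into the fallback
theorem gAtD_cons (x : String) (xs : List String) (cur : String) (c : Nat) :
    gAtD (x :: xs) cur (c+1) = gAtD xs (if PySem.Str.strip x ≠ "" then PySem.Str.strip x else cur) c := by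
  induction c with
  | zero => simp only [gAtD, List.getD_cons_succ, List.getD_cons_zero]
  | succ c ih =>
    conv_lhs => rw [gAtD]
    conv_rhs => rw [gAtD]
    simp only [List.getD_cons_succ]
    rw [ih]

-- the forward fill's c-th entry is exactly the backward search's answer at c
theorem ffAux_getD (xs : List String) (cur : String) (c : Nat) (hc : c < xs.length) :
    (ffAux cur xs).getD c "" = gAtD xs cur c := by
  induction xs generalizing cur c with
  | nil => simp at hc
  | cons x xt ih =>
    cases c with
    | zero => simp [ffAux, gAtD]
    | succ c =>
      rw [gAtD_cons]
      simp only [ffAux, List.getD_cons_succ]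
      exact ih _ c (by simpa using hc)

-- the backward search only looks at indices ≤ c
theorem gAtD_congr (xs ys : List String) (cur : String) (c : Nat)
    (h : ∀ j ≤ c, xs.getD j "" = ys.getD j "") : gAtD xs cur c = gAtD ys cur c := by
  induction c with
  | zero => simp only [gAtD, h 0 (Nat.le_refl 0)]
  | succ c ih =>
    simp only [gAtD, h (c+1) (Nat.le_refl _)]
    rw [ih (fun j hj => h j (Nat.le_succ_of_le hj))]

-- the backward search's answer is strip-fixed when the fallback is
theorem gAtD_strip (xs : List String) (cur : String) (hcur : PySem.Str.strip cur = cur) (c : Nat) :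
    PySem.Str.strip (gAtD xs cur c) = gAtD xs cur c := by
  induction c with
  | zero =>
    simp only [gAtD]
    split
    · exact str_strip_strip _
    · exact hcur
  | succ c ih =>
    simp only [gAtD]
    split
    · exact str_strip_strip _
    · exact ih

-- padding below m is invisible to getD with default ""
theorem getD_pad (xs : List String) (m c : Nat) (hc : c < m) :
    (xs ++ List.replicate (m - xs.length) "").getD c "" = xs.getD c "" := by
  by_cases h : c < xs.length
  · simp [List.getD, List.getElem?_append_left h]
  · rw [List.getD, List.getD, List.getElem?_append_right (by omega),
        List.getElem?_eq_none (l := xs) (by omega)]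
    simp [List.getElem?_replicate]
    split <;> rfl

theorem length_pad (xs : List String) (m : Nat) (h : xs.length ≤ m) :
    (xs ++ List.replicate (m - xs.length) "").length = m := by
  simp; omega

-- named tails of the two ports (definitionally equal to the ports after the guards)
def coreA (hg hd : List String) (rows : List (List String)) (joiner : String) : List String :=
  let m := max hg.length (max hd.length ((rows.map List.length).foldl max 0))
  (PySem.List.pyRange 0 (m : Int) 1).foldl (fun combined c =>
      let g := PySem.Str.strip (PySem.List.pyGetD (forward_fill (hg ++ List.replicate (m - hg.length) "")) c "")
      let d := PySem.Str.strip (PySem.List.pyGetD (hd ++ List.replicate (m - hd.length) "") c "")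
      if g ≠ "" ∧ d ≠ "" then combined ++ [g ++ joiner ++ d]
      else if d ≠ "" then combined ++ [d]
      else if g ≠ "" then combined ++ [g]
      else combined ++ [""]) []

def coreB (hg hd : List String) (rows : List (List String)) (joiner : String) : List String :=
  let m := max hg.length (max hd.length ((rows.map List.length).foldl max 0))
  (List.range m).foldl (fun out c =>
      let g := group_at hg c
      let d := PySem.Str.strip (hd.getD c "")
      out ++ [if g ≠ "" ∧ d ≠ "" then g ++ joiner ++ d else if d ≠ "" then d else g]) []

-- per-column agreement of the two loop bodies' appended entries
theorem entry_eq (hg hd : List String) (m : Nat) (joiner : String) (c : Nat)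
    (h1 : hg.length ≤ m) (hc : c < m) :
    (let g := PySem.Str.strip ((forward_fill (hg ++ List.replicate (m - hg.length) "")).getD c "")
     let d := PySem.Str.strip ((hd ++ List.replicate (m - hd.length) "").getD c "")
     if g ≠ "" ∧ d ≠ "" then [g ++ joiner ++ d]
     else if d ≠ "" then [d]
     else if g ≠ "" then [g]
     else [""])
    = (let g := group_at hg c
       let d := PySem.Str.strip (hd.getD c "")
       [if g ≠ "" ∧ d ≠ "" then g ++ joiner ++ d else if d ≠ "" then d else g]) := by
  have hlen : c < (hg ++ List.replicate (m - hg.length) "").length := by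
    rw [length_pad hg m h1]; exact hc
  have hg1 : (forward_fill (hg ++ List.replicate (m - hg.length) "")).getD c "" = gAtD hg "" c := by
    rw [forward_fill_eq, ffAux_getD _ "" c hlen]
    exact gAtD_congr _ _ "" c (fun j hj => getD_pad hg m j (Nat.lt_of_le_of_lt hj hc))
  have hstrip : PySem.Str.strip (gAtD hg "" c) = gAtD hg "" c :=
    gAtD_strip hg "" (by decide) c
  have hd1 : (hd ++ List.replicate (m - hd.length) "").getD c "" = hd.getD c "" :=
    getD_pad hd m c hc
  simp only [hg1, hstrip, hd1, group_at_eq_gAtD]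
  set g := gAtD hg "" c
  set d := PySem.Str.strip (hd.getD c "")
  by_cases hG : g = "" <;> by_cases hD : d = "" <;> simp [hG, hD]

theorem core_eq (hg hd : List String) (m : Nat) (joiner : String) (h1 : hg.length ≤ m) :
    (PySem.List.pyRange 0 (m : Int) 1).foldl (fun combined c =>
        let g := PySem.Str.strip (PySem.List.pyGetD (forward_fill (hg ++ List.replicate (m - hg.length) "")) c "")
        let d := PySem.Str.strip (PySem.List.pyGetD (hd ++ List.replicate (m - hd.length) "") c "")
        if g ≠ "" ∧ d ≠ "" then combined ++ [g ++ joiner ++ d]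
        else if d ≠ "" then combined ++ [d]
        else if g ≠ "" then combined ++ [g]
        else combined ++ [""]) []
    = (List.range m).foldl (fun out c =>
        let g := group_at hg c
        let d := PySem.Str.strip (hd.getD c "")
        out ++ [if g ≠ "" ∧ d ≠ "" then g ++ joiner ++ d else if d ≠ "" then d else g]) [] := by
  rw [PySem.List.pyRange_zero_nat, List.foldl_map]
  simp only [PySem.List.pyGetD_natCast]
  have hbodies : ∀ (acc : List String), ∀ c ∈ List.range m,
      (let g := PySem.Str.strip ((forward_fill (hg ++ List.replicate (m - hg.length) "")).getD c "")
       let d := PySem.Str.strip ((hd ++ List.replicate (m - hd.length) "").getD c "")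
       if g ≠ "" ∧ d ≠ "" then acc ++ [g ++ joiner ++ d]
       else if d ≠ "" then acc ++ [d]
       else if g ≠ "" then acc ++ [g]
       else acc ++ [""])
      = (let g := group_at hg c
         let d := PySem.Str.strip (hd.getD c "")
         acc ++ [if g ≠ "" ∧ d ≠ "" then g ++ joiner ++ d else if d ≠ "" then d else g]) := by
    intro acc c hc
    have := entry_eq hg hd m joiner c h1 (List.mem_range.mp hc)
    dsimp only at this ⊢
    split_ifs at this ⊢ <;> simp_all
  exact PySem.List.foldl_congr_mem _ _ _ _ hbodies

theorem coreA_eq_coreB (hg hd : List String) (rows : List (List String)) (joiner : String) :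
    coreA hg hd rows joiner = coreB hg hd rows joiner :=
  core_eq hg hd (max hg.length (max hd.length ((rows.map List.length).foldl max 0))) joiner
    (Nat.le_max_left _ _)

-- ===== VERDICT (by name: the statement is the Claim_ definition above) =====
theorem build_composite_headers_spec : Claim_equal_build_composite_headers := by
  intro rows g d joiner _ hpre
  obtain ⟨h1, h2, h3, h4⟩ := hpre
  show build_composite_headers rows g d joiner = build_composite_headers_alt rows g d joiner
  have eA : build_composite_headers rows g d joiner =
      coreA ((PySem.List.pyGet? rows (g - 1)).getD []) ((PySem.List.pyGet? rows (d - 1)).getD [])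
        rows joiner := by
    show (if g - 1 < 0 ∨ d - 1 < 0 then ([] : List String)
          else if (rows.length : Int) ≤ g - 1 ∨ (rows.length : Int) ≤ d - 1 then []
          else coreA (if (rows.length : Int) > g - 1 then (PySem.List.pyGet? rows (g - 1)).getD [] else [])
                     (if (rows.length : Int) > d - 1 then (PySem.List.pyGet? rows (d - 1)).getD [] else [])
                     rows joiner)
        = coreA ((PySem.List.pyGet? rows (g - 1)).getD []) ((PySem.List.pyGet? rows (d - 1)).getD [])
            rows joiner
    rw [if_neg (by omega : ¬(g - 1 < 0 ∨ d - 1 < 0)),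
        if_neg (by omega : ¬((rows.length : Int) ≤ g - 1 ∨ (rows.length : Int) ≤ d - 1)),
        if_pos (by omega : (rows.length : Int) > g - 1),
        if_pos (by omega : (rows.length : Int) > d - 1)]
  have eB : build_composite_headers_alt rows g d joiner =
      coreB ((PySem.List.pyGet? rows (g - 1)).getD []) ((PySem.List.pyGet? rows (d - 1)).getD [])
        rows joiner := by
    show (if g - 1 < 0 ∨ d - 1 < 0 then ([] : List String)
          else if (rows.length : Int) ≤ g - 1 ∨ (rows.length : Int) ≤ d - 1 then []
          else coreB ((PySem.List.pyGet? rows (g - 1)).getD []) ((PySem.List.pyGet? rows (d - 1)).getD [])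
                     rows joiner)
        = coreB ((PySem.List.pyGet? rows (g - 1)).getD []) ((PySem.List.pyGet? rows (d - 1)).getD [])
            rows joiner
    rw [if_neg (by omega : ¬(g - 1 < 0 ∨ d - 1 < 0)),
        if_neg (by omega : ¬((rows.length : Int) ≤ g - 1 ∨ (rows.length : Int) ≤ d - 1))]
  exact eA.trans ((coreA_eq_coreB _ _ _ _).trans eB.symm)
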